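-- pv_equiv track=rewrite | github.com/ShadabMizan/Word-Cookies-Solver | Words.py | guessWords
-- ===== SOURCE A (Python) =====
-- from itertools import permutations
--
-- def guessWords(lettersDict, wordsLeft, bigrams, trigrams):
--     letters = []
--
--     trigramPerms = []
--     bigramPerms = []
--     # Extract letters from the lettersDict
--     for l, data in lettersDict.items():
--         numl = len(data[1])
--         for n in range(0,numl):
--             letters.append(l)
--
--     # Figure out if we can make any trigrams
--     trigramsFound = []
--     for trigram in trigrams:
--         found = True
--         tempLetters = letters.copy()
--         for i in range(0, 3):
--             if trigram[i].upper() not in tempLetters: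
--                 found = False
--                 break
--             tempLetters.remove(trigram[i].upper())
--
--         if found:
--             trigramsFound.append(trigram.upper())
--
--     # Check Bigrams
--     bigramsFound = []
--     for bigram in bigrams:
--         found = True
--         tempLetters = letters.copy()
--         for i in range(0, 2):
--             if bigram[i].upper() not in tempLetters:
--                 found = False
--                 break
--             tempLetters.remove(bigram[i].upper())
--
--         if found:
--             bigramsFound.append(bigram.upper())
--
--     # At this point, we have a list of popular trigrams and bigrams for the letters we have.
--     # Next is to test all permutations of the remaining letters and the ngrams for the letter sizes we are missing.
--     # wordsLeft contains an array like [5, 3, 3] i.e missing a 5 letter word and 2 3 letter words.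
--     # Therefore look for all 5 letter permutations with the ngrams.
--     for wordSize in wordsLeft:
--         for trigram in trigramsFound:
--             letterComb = [trigram]
--             for i in range(0, len(letters)):
--                 if letters[i] not in trigram:
--                     letterComb.append(letters[i])
--
--             # At this point, letterComb would have a list containing the trigram and the remaining letters
--             perms = permutations(letterComb, wordSize)
--             for phrase in perms:
--                 phrase = ''.join(phrase)
--                 if len(phrase) == wordSize:
--                     trigramPerms.append(phrase)
--
--         for bigram in bigramsFound:
--             letterComb = [bigram]
--             for i in range(0, len(letters)):
--                 if letters[i] not in bigram:
--                     letterComb.append(letters[i])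
--
--             perms = permutations(letterComb, wordSize)
--             for phrase in perms:
--                 phrase = ''.join(phrase)
--                 if len(phrase) == wordSize:
--                     bigramPerms.append(phrase)
--
--     return trigramPerms, bigramPerms
-- ===== SOURCE B (Python) =====
-- from itertools import permutations
--
-- def guessWords(lettersDict, wordsLeft, bigrams, trigrams):
--     # letters: each key repeated once per entry of data[1]
--     letters = [l for l, data in lettersDict.items() for _ in data[1]]
--
--     # an n-gram is feasible iff the multiset of its first k letters fits in the letter pool
--     def feasible(ng, k):
--         chars = [c.upper() for c in ng[:k]]
--         return all(chars.count(c) <= letters.count(c) for c in chars)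
--
--     trigramsFound = [t.upper() for t in trigrams if feasible(t, 3)]
--     bigramsFound = [b.upper() for b in bigrams if feasible(b, 2)]
--
--     # generate permutations of the letters outside the n-gram only (the n-gram element
--     # itself can never fit the length bound), keeping those of total length wordSize
--     triPerms = [''.join(p)
--                 for w in wordsLeft
--                 for ng in trigramsFound
--                 for p in permutations([c for c in letters if c not in ng], w)
--                 if sum(map(len, p)) == w]
--     biPerms = [''.join(p)
--                for w in wordsLeft
--                for ng in bigramsFound
--                for p in permutations([c for c in letters if c not in ng], w)
--                if sum(map(len, p)) == w]
--     return triPerms, biPerms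
-- ===== Notes on version B (the rewrite author's own statement) =====
-- stated objective: simpler
-- what changed: Feasibility of each n-gram is decided by a multiset count comparison over its first k characters instead of A's destructive copy-and-remove loop, and the word generation enumerates permutations of only the remaining letters (never prepending the n-gram element, which can never satisfy the length bound) with a summed-element-length test instead of A's join-then-measure filter over the larger pool.
import Mathlib
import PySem

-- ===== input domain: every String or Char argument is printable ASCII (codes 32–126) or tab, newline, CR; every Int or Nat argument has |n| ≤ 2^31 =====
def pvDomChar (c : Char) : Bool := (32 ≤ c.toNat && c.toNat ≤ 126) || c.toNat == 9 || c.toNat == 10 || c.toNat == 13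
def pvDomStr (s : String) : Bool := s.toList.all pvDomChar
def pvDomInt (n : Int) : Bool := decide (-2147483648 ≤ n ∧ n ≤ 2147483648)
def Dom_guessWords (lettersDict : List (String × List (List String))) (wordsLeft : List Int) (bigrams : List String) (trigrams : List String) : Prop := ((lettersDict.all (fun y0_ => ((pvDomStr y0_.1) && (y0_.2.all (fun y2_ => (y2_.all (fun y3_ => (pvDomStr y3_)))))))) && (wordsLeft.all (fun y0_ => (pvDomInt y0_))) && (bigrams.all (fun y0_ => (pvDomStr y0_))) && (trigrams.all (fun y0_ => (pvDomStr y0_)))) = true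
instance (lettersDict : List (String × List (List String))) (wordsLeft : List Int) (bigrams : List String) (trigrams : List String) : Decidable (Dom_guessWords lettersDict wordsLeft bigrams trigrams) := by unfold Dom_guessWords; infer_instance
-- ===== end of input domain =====

-- B replaces A's destructive copy-and-remove feasibility loop by a multiset count check, and
-- generates permutations of the remaining letters directly instead of A's generate-then-length-filter
-- pass over permutations that also draw the n-gram element (objective: simpler).

-- ===== PORT A =====
-- letters: for l, data in items: for n in range(0, len(data[1])): letters.append(l)
def pvLettersA (lettersDict : List (String × List (List String))) : List String :=
  lettersDict.foldl (fun acc p =>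
    (PySem.List.pyRange 0 (PySem.List.len (PySem.List.pyGetD p.2 1 [])) 1).foldl
      (fun a _ => a ++ [p.1]) acc) []

-- the found-flag loop: for i in range(0, k): if ng[i].upper() not in tempLetters: found=False; break; tempLetters.remove(ng[i].upper())
def pvFoundA (letters : List String) (k : Int) (ng : String) : Bool :=
  ((PySem.List.pyRange 0 k 1).foldl (fun (st : Bool × List String) i =>
      if st.1 then
        (if st.2.contains (PySem.Str.upper (String.singleton ((PySem.Str.pyGet? ng i).getD ' '))) then
          (true, st.2.erase (PySem.Str.upper (String.singleton ((PySem.Str.pyGet? ng i).getD ' '))))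
        else (false, st.2))
      else st) (true, letters)).1

-- letterComb = [ngram]; for i in range(0, len(letters)): if letters[i] not in ngram: letterComb.append(letters[i])
def pvCombA (letters : List String) (ng : String) : List String :=
  letters.foldl (fun lc l => if PySem.Str.isIn l ng then lc else lc ++ [l]) [ng]

-- for phrase in permutations(letterComb, wordSize): phrase=''.join(phrase); if len(phrase)==wordSize: out.append(phrase)
def pvPermsA (letters : List String) (w : Int) (ng : String) (acc : List String) : List String :=
  (PySem.List.permutations (pvCombA letters ng) w.toNat).foldl (fun a p =>
    if PySem.Str.len (PySem.Str.join "" p) == w then a ++ [PySem.Str.join "" p] else a) acc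

def guessWords (lettersDict : List (String × List (List String))) (wordsLeft : List Int) (bigrams : List String) (trigrams : List String) : List String × List String :=
  wordsLeft.foldl (fun (res : List String × List String) wordSize =>
    ((trigrams.foldl (fun acc t =>
        if pvFoundA (pvLettersA lettersDict) 3 t then acc ++ [PySem.Str.upper t] else acc) []).foldl
      (fun acc tg => pvPermsA (pvLettersA lettersDict) wordSize tg acc) res.1,
     (bigrams.foldl (fun acc b =>
        if pvFoundA (pvLettersA lettersDict) 2 b then acc ++ [PySem.Str.upper b] else acc) []).foldl
      (fun acc bg => pvPermsA (pvLettersA lettersDict) wordSize bg acc) res.2)) ([], [])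

-- ===== PORT B =====
-- letters = [l for l, data in lettersDict.items() for _ in data[1]]
def pvLettersB (lettersDict : List (String × List (List String))) : List String :=
  lettersDict.flatMap (fun p => (PySem.List.pyGetD p.2 1 []).map (fun _ => p.1))

-- chars = [c.upper() for c in ng[:k]]; all(chars.count(c) <= letters.count(c) for c in chars)
def pvFeasibleB (letters : List String) (ng : String) (k : Int) : Bool :=
  ((PySem.Str.slice ng none (some k)).toList.map (fun c => PySem.Str.upper (String.singleton c))).all
    (fun c => PySem.List.count
        ((PySem.Str.slice ng none (some k)).toList.map (fun c => PySem.Str.upper (String.singleton c))) c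
      ≤ PySem.List.count letters c)

-- [''.join(p) for w in wordsLeft for ng in found
--    for p in permutations([c for c in letters if c not in ng], w) if sum(map(len, p)) == w]
def pvGenB (letters : List String) (wordsLeft : List Int) (found : List String) : List String :=
  wordsLeft.flatMap (fun w => found.flatMap (fun ng =>
    ((PySem.List.permutations (letters.filter (fun l => !(PySem.Str.isIn l ng))) w.toNat).filter
        (fun p => (p.map PySem.Str.len).sum == w)).map
      (PySem.Str.join "")))

def guessWords_alt (lettersDict : List (String × List (List String))) (wordsLeft : List Int) (bigrams : List String) (trigrams : List String) : List String × List String :=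
  (pvGenB (pvLettersB lettersDict) wordsLeft
     ((trigrams.filter (fun t => pvFeasibleB (pvLettersB lettersDict) t 3)).map PySem.Str.upper),
   pvGenB (pvLettersB lettersDict) wordsLeft
     ((bigrams.filter (fun b => pvFeasibleB (pvLettersB lettersDict) b 2)).map PySem.Str.upper))

-- ===== PRECONDITION & SPEC =====
-- the letter pool A extracts (each key repeated len(data[1]) times), restated for Pre_
def pvPoolLetters (lettersDict : List (String × List (List String))) : List String :=
  lettersDict.flatMap (fun p => List.replicate (p.2.getD 1 []).length p.1)

-- the multiset of the first k characters of ng, uppercased, fits into the letter pool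
def pvFitsB (letters : List String) (ng : String) (k : Nat) : Bool :=
  ((ng.toList.take k).map (fun ch => PySem.Str.upper (String.singleton ch))).all
    (fun c => decide (List.count c ((ng.toList.take k).map
        (fun ch => PySem.Str.upper (String.singleton ch))) ≤ List.count c letters))

-- Pre_ excludes exactly the inputs on which A raises an IndexError: an entry of lettersDict whose
-- value list has fewer than 2 elements (data[1] fails), and a trigram shorter than 3 (resp. bigram
-- shorter than 2) all of whose characters are available in the letter pool, so that A's check loop
-- runs past the end of the string (ng[i] fails instead of breaking early).
def Pre_guessWords (lettersDict : List (String × List (List String))) (wordsLeft : List Int) (bigrams : List String) (trigrams : List String) : Prop :=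
  (∀ p ∈ lettersDict, 2 ≤ p.2.length) ∧
  (∀ t ∈ trigrams, 3 ≤ t.toList.length ∨ pvFitsB (pvPoolLetters lettersDict) t 3 = false) ∧
  (∀ b ∈ bigrams, 2 ≤ b.toList.length ∨ pvFitsB (pvPoolLetters lettersDict) b 2 = false)
instance (lettersDict : List (String × List (List String))) (wordsLeft : List Int) (bigrams : List String) (trigrams : List String) : Decidable (Pre_guessWords lettersDict wordsLeft bigrams trigrams) := by unfold Pre_guessWords; infer_instance

def pvWitness_guessWords : (List (String × List (List String))) × List Int × List String × List String :=
  ([("A", [[], ["x", "y"]]), ("T", [[], ["x"]])], [1, 2], ["at"], ["tat"])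

def Spec_guessWords (lettersDict : List (String × List (List String))) (wordsLeft : List Int) (bigrams : List String) (trigrams : List String) (out : List String × List String) : Prop := out = guessWords_alt lettersDict wordsLeft bigrams trigrams
instance (lettersDict : List (String × List (List String))) (wordsLeft : List Int) (bigrams : List String) (trigrams : List String) (out : List String × List String) : Decidable (Spec_guessWords lettersDict wordsLeft bigrams trigrams out) := by unfold Spec_guessWords; infer_instance

-- ===== CLAIM (what is proved, stated in full; the proofs are below) =====
def Claim_equal_guessWords : Prop := ∀ (lettersDict : List (String × List (List String))) (wordsLeft : List Int) (bigrams : List String) (trigrams : List String), Dom_guessWords lettersDict wordsLeft bigrams trigrams → Pre_guessWords lettersDict wordsLeft bigrams trigrams → Spec_guessWords lettersDict wordsLeft bigrams trigrams (guessWords lettersDict wordsLeft bigrams trigrams)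

-- ===== LEMMAS AND PROOFS =====

theorem pv_filter_flatMap {A B : Type} (l : List A) (G : A → List B) (q : B → Bool) :
    (l.flatMap G).filter q = l.flatMap (fun i => (G i).filter q) := by
  induction l with
  | nil => rfl
  | cons a l ih => simp [List.filter_append, ih]

theorem pv_flatMap_congr {A B : Type} (l : List A) (f g : A → List B)
    (h : ∀ x ∈ l, f x = g x) : l.flatMap f = l.flatMap g := by
  induction l with
  | nil => rfl
  | cons a l ih => simp_all

theorem pv_letters_eq (lettersDict : List (String × List (List String))) :
    pvLettersA lettersDict = pvLettersB lettersDict := by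
  unfold pvLettersA pvLettersB
  have h : ∀ (acc : List String) (p : String × List (List String)),
      (PySem.List.pyRange 0 (PySem.List.len (PySem.List.pyGetD p.2 1 [])) 1).foldl
        (fun a _ => a ++ [p.1]) acc
      = acc ++ (PySem.List.pyGetD p.2 1 []).map (fun _ => p.1) := by
    intro acc p
    rw [PySem.List.foldl_append_singleton_eq_map (fun _ => p.1)]
    congr 1
    rw [List.map_const', List.map_const']
    congr 1
    simp [PySem.List.length_pyRange_one, PySem.List.len_eq]
  simp only [h]
  rw [PySem.List.foldl_append_eq_flatMap]
  simp

theorem pv_rest_len_ge (letters : List String) (ng : String) :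
    ∀ l ∈ letters.filter (fun l => !(PySem.Str.isIn l ng)), 1 ≤ l.toList.length := by
  intro l hl
  have hni := List.of_mem_filter hl
  by_contra hlen
  have hnil : l.toList = [] := by
    cases h : l.toList with
    | nil => rfl
    | cons a as => rw [h] at hlen; simp at hlen
  have : PySem.Str.isIn l ng = true := by
    rw [PySem.Str.isIn_iff_infix, hnil]
    exact List.nil_infix
  rw [this] at hni
  simp at hni

-- sequential membership-and-remove check, the shape of A's found loop
def pvSeq : List String → List String → Bool
  | [], _ => true
  | c :: cs, tl => if tl.contains c then pvSeq cs (tl.erase c) else false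

theorem pv_seq_eq_count (cs tl : List String) :
    pvSeq cs tl = cs.all (fun c => decide (cs.count c ≤ tl.count c)) := by
  induction cs generalizing tl with
  | nil => rfl
  | cons c cs ih =>
    simp only [pvSeq, List.all_cons]
    by_cases hc : c ∈ tl
    · rw [if_pos (by simpa using hc), ih]
      have h1 : 1 ≤ tl.count c := List.one_le_count_iff.mpr hc
      have hpt : (fun x => decide (cs.count x ≤ (tl.erase c).count x))
          = (fun x => decide ((c :: cs).count x ≤ tl.count x)) := by
        funext x
        rw [List.count_erase, List.count_cons]
        apply decide_eq_decide.mpr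
        by_cases hx : x = c
        · subst hx
          simp <;> omega
        · have e1 : (c == x) = false := beq_eq_false_iff_ne.mpr (Ne.symm hx)
          have e2 : (x == c) = false := beq_eq_false_iff_ne.mpr hx
          simp [e1, e2]
      rw [hpt]
      cases hhead : decide ((c :: cs).count c ≤ tl.count c) with
      | true => simp
      | false =>
        have harith : tl.count c < cs.count c + 1 := by
          have := of_decide_eq_false hhead
          rw [List.count_cons_self] at this
          omega
        have hcc : c ∈ cs := by
          by_contra hcc
          have h0 : cs.count c = 0 := List.count_eq_zero.mpr hcc
          omega
        rw [Bool.false_and]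
        refine List.all_eq_false.mpr ⟨c, hcc, ?_⟩
        rw [List.count_cons_self]
        simpa using (by omega : ¬ (cs.count c + 1 ≤ tl.count c))
    · rw [if_neg (by simpa using hc)]
      have h0 : tl.count c = 0 := List.count_eq_zero.mpr hc
      have : decide ((c :: cs).count c ≤ tl.count c) = false := by
        rw [List.count_cons_self]
        simpa using (by omega : ¬ (cs.count c + 1 ≤ tl.count c))
      rw [this, Bool.false_and]

theorem pv_foldflag_false (cs : List String) (st : Bool × List String) (h : st.1 = false) :
    (cs.foldl (fun (st : Bool × List String) (c : String) =>
      if st.1 then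
        (if st.2.contains c then (true, st.2.erase c) else (false, st.2))
      else st) st) = st := by
  induction cs generalizing st with
  | nil => rfl
  | cons c cs ih =>
    simp only [List.foldl_cons, h]
    rw [if_neg (by simp [h]), ih st h]

theorem pv_foldflag (cs tl : List String) :
    (cs.foldl (fun (st : Bool × List String) (c : String) =>
      if st.1 then
        (if st.2.contains c then (true, st.2.erase c) else (false, st.2))
      else st) (true, tl)).1 = pvSeq cs tl := by
  induction cs generalizing tl with
  | nil => rfl
  | cons c cs ih =>
    simp only [List.foldl_cons, pvSeq, if_pos]
    by_cases hc : tl.contains c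
    · rw [if_pos hc, if_pos hc]
      exact ih (tl.erase c)
    · rw [if_neg hc, if_neg hc, pv_foldflag_false cs (false, tl) rfl]

theorem pv_found_eq_feasible (letters : List String) (k : Nat) (ng : String)
    (hk : k ≤ ng.toList.length) :
    pvFoundA letters (k : Int) ng = pvFeasibleB letters ng (k : Int) := by
  unfold pvFoundA pvFeasibleB
  have hchars : (PySem.Str.slice ng none (some (k : Int))).toList.map
        (fun c => PySem.Str.upper (String.singleton c))
      = (ng.toList.take k).map (fun c => PySem.Str.upper (String.singleton c)) := by
    rw [PySem.Str.toList_slice]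
    show ((PySem.List.slice ng.toList none (some (k:Int))).map _ = _)
    rw [PySem.List.slice_to_natCast]
  have hrange : (PySem.List.pyRange 0 (k : Int) 1).map
        (fun i => PySem.Str.upper (String.singleton ((PySem.Str.pyGet? ng i).getD ' ')))
      = (ng.toList.take k).map (fun c => PySem.Str.upper (String.singleton c)) := by
    rw [PySem.List.pyRange_zero_nat]
    apply List.ext_getElem
    · simp only [List.length_map, List.length_range, List.length_take]; omega
    · intro i h1 h2
      simp only [List.getElem_map, Function.comp_apply, List.getElem_range]
      congr 1
      have hi : i < ng.toList.length := by
        have : i < k := by simpa using h1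
        omega
      rw [PySem.Str.pyGet?_natCast, List.getElem?_eq_getElem hi]
      simp [List.getElem_take]
  rw [hchars, ← List.foldl_map
    (f := fun i => PySem.Str.upper (String.singleton ((PySem.Str.pyGet? ng i).getD ' ')))
    (g := fun (st : Bool × List String) c =>
      if st.1 then
        (if st.2.contains c then (true, st.2.erase c) else (false, st.2))
      else st),
    pv_foldflag, pv_seq_eq_count, hrange]
  simp [PySem.List.count]

theorem pv_pool_eq (lettersDict : List (String × List (List String))) :
    pvPoolLetters lettersDict = pvLettersB lettersDict := by
  unfold pvPoolLetters pvLettersB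
  apply pv_flatMap_congr
  intro p _
  have h1 : PySem.List.pyGetD p.2 1 [] = p.2.getD 1 [] := by
    rw [show ((1 : Int)) = ((1 : Nat) : Int) by norm_num, PySem.List.pyGetD_natCast]
  rw [List.map_const', h1]

theorem pv_feasibleB_eq (letters : List String) (ng : String) (k : Nat) :
    pvFeasibleB letters ng (k : Int) = pvFitsB letters ng k := by
  unfold pvFeasibleB pvFitsB
  have hchars : (PySem.Str.slice ng none (some (k : Int))).toList.map
        (fun c => PySem.Str.upper (String.singleton c))
      = (ng.toList.take k).map (fun c => PySem.Str.upper (String.singleton c)) := by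
    rw [PySem.Str.toList_slice]
    show ((PySem.List.slice ng.toList none (some (k:Int))).map _ = _)
    rw [PySem.List.slice_to_natCast]
  rw [hchars]
  simp [PySem.List.count]

theorem pv_cs_take (k : Nat) (ng : String) :
    (((PySem.List.pyRange 0 (k : Int) 1).map
        (fun i => PySem.Str.upper (String.singleton ((PySem.Str.pyGet? ng i).getD ' ')))).take
      (min k ng.toList.length))
      = (ng.toList.take k).map (fun c => PySem.Str.upper (String.singleton c)) := by
  rw [PySem.List.pyRange_zero_nat, List.map_map]
  apply List.ext_getElem
  · simp only [List.length_take, List.length_map, List.length_range]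
    omega
  · intro i h1 h2
    have hilen : i < ng.toList.length := by
      simp only [List.length_map, List.length_take] at h2
      omega
    simp only [List.getElem_take, List.getElem_map, List.getElem_range, Function.comp_apply]
    congr 1
    rw [PySem.Str.pyGet?_natCast, List.getElem?_eq_getElem hilen]
    rfl

theorem pv_found_false (letters : List String) (k : Nat) (ng : String)
    (hnf : pvFitsB letters ng k = false) : pvFoundA letters (k : Int) ng = false := by
  unfold pvFoundA
  rw [← List.foldl_map
    (f := fun i => PySem.Str.upper (String.singleton ((PySem.Str.pyGet? ng i).getD ' ')))
    (g := fun (st : Bool × List String) c =>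
      if st.1 then
        (if st.2.contains c then (true, st.2.erase c) else (false, st.2))
      else st),
    pv_foldflag, pv_seq_eq_count]
  obtain ⟨c, hcmem, hcbad⟩ := List.all_eq_false.mp hnf
  have hcnt : ¬ (List.count c ((ng.toList.take k).map
      (fun ch => PySem.Str.upper (String.singleton ch))) ≤ List.count c letters) := by
    simpa using hcbad
  have hsplit := List.take_append_drop (min k ng.toList.length)
    ((PySem.List.pyRange 0 (k : Int) 1).map
      (fun i => PySem.Str.upper (String.singleton ((PySem.Str.pyGet? ng i).getD ' '))))
  rw [pv_cs_take] at hsplit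
  refine List.all_eq_false.mpr ⟨c, ?_, ?_⟩
  · rw [← hsplit]
    exact List.mem_append_left _ hcmem
  · rw [← hsplit, List.count_append]
    simpa using (by omega :
      ¬ (List.count c ((ng.toList.take k).map (fun ch => PySem.Str.upper (String.singleton ch)))
        + List.count c (((PySem.List.pyRange 0 (k : Int) 1).map
            (fun i => PySem.Str.upper (String.singleton ((PySem.Str.pyGet? ng i).getD ' ')))).drop
          (min k ng.toList.length)) ≤ List.count c letters))

-- ''.join
def pvJ (p : List String) : String := PySem.Str.join "" p

theorem pv_join_nil (parts : List (List Char)) :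
    PySem.Chars.join [] parts = parts.flatten := by
  induction parts with
  | nil => rfl
  | cons h t ih =>
    cases t with
    | nil => simp [PySem.Chars.join, List.intercalate]
    | cons h2 t2 =>
      simp only [PySem.Chars.join, List.intercalate, List.intersperse] at *
      simp_all

theorem pvJ_toList (p : List String) : (pvJ p).toList = (p.map String.toList).flatten := by
  unfold pvJ
  rw [PySem.Str.toList_join]
  exact pv_join_nil _

theorem pvJ_cons (x : String) (p : List String) : pvJ (x :: p) = x ++ pvJ p := by
  apply String.toList_inj.mp
  rw [String.toList_append, pvJ_toList, pvJ_toList]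
  simp

theorem pv_len_J_ge (ys : List String) (r : Nat) (p : List String)
    (h1 : ∀ l ∈ ys, 1 ≤ l.toList.length) (hp : p ∈ PySem.List.permutations ys r) :
    r ≤ (pvJ p).toList.length := by
  rw [pvJ_toList, List.length_flatten, List.map_map]
  have hlen : p.length = r := PySem.List.length_of_mem_permutations hp
  have hone : ∀ x ∈ p.map (List.length ∘ String.toList), 1 ≤ x := by
    intro x hx
    obtain ⟨s, hs, rfl⟩ := List.mem_map.mp hx
    exact h1 s (PySem.List.mem_of_mem_of_mem_permutations hp hs)
  calc r = (p.map (List.length ∘ String.toList)).length := by simp [hlen]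
    _ ≤ (p.map (List.length ∘ String.toList)).sum := List.length_le_sum_of_one_le _ hone

-- match-free reformulation of PySem.List.permutations, for rewriting under binders
def pvPerms (xs : List String) : Nat → List (List String)
  | 0 => [[]]
  | r+1 => (List.range xs.length).flatMap (fun i =>
      ((xs[i]?.map (fun x => (pvPerms (xs.eraseIdx i) r).map (x :: ·))).getD []))

theorem pvPerms_eq (r : Nat) : ∀ (xs : List String), pvPerms xs r = PySem.List.permutations xs r := by
  induction r with
  | zero => intro xs; rfl
  | succ r ih =>
    intro xs
    rw [PySem.List.permutations_succ]
    show (List.range xs.length).flatMap _ = (List.range xs.length).flatMap _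
    apply pv_flatMap_congr
    intro i _
    cases h : xs[i]? with
    | none => simp [h]
    | some x => simp [h, ih]

-- the main lemma: under the total-length filter, permutations drawn from the n-gram element
-- (length >= 2) can never survive, so the n-gram element can be dropped from the pool
theorem pv_main (t : String) (ht : 2 ≤ t.toList.length) :
    ∀ (r m : Nat), m ≤ r → ∀ (l1 l2 : List String), (∀ l ∈ l1 ++ l2, 1 ≤ l.toList.length) →
    ((PySem.List.permutations (l1 ++ t :: l2) r).filter
        (fun p => (pvJ p).toList.length == m)).map pvJ
      = ((PySem.List.permutations (l1 ++ l2) r).filter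
        (fun p => (pvJ p).toList.length == m)).map pvJ := by
  intro r
  induction r with
  | zero =>
    intro m _ l1 l2 _
    rw [PySem.List.permutations_zero, PySem.List.permutations_zero]
  | succ r ih =>
    intro m hm l1 l2 h1
    have hcons : ∀ (x : String), x.toList.length ≤ m → ∀ (P : List (List String)),
        List.map pvJ ((List.map (x :: ·) P).filter (fun p => (pvJ p).toList.length == m))
        = List.map (fun s => x ++ s)
            (List.map pvJ (P.filter (fun p => (pvJ p).toList.length == m - x.toList.length))) := by
      intro x hx P
      rw [List.filter_map]
      have hq : ((fun p => (pvJ p).toList.length == m) ∘ (x :: ·))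
          = (fun p => (pvJ p).toList.length == m - x.toList.length) := by
        funext p
        simp only [Function.comp_apply]
        rw [pvJ_cons, String.toList_append, List.length_append]
        rcases eq_or_ne ((pvJ p).toList.length) (m - x.toList.length) with h | h
        · have e1 : (x.toList.length + (pvJ p).toList.length == m) = true := by
            simpa using (by omega : x.toList.length + (pvJ p).toList.length = m)
          have e2 : ((pvJ p).toList.length == m - x.toList.length) = true := by
            simpa using h
          rw [e1, e2]
        · have e1 : (x.toList.length + (pvJ p).toList.length == m) = false := by
            simpa using (by omega : ¬ (x.toList.length + (pvJ p).toList.length = m))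
          have e2 : ((pvJ p).toList.length == m - x.toList.length) = false :=
            beq_eq_false_iff_ne.mpr h
          rw [e1, e2]
      rw [hq, List.map_map, List.map_map]
      exact List.map_congr_left (fun p _ => pvJ_cons x p)
    have hnil : ∀ (x : String), ¬ (x.toList.length ≤ m) → ∀ (P : List (List String)),
        (List.map (x :: ·) P).filter (fun p => (pvJ p).toList.length == m) = [] := by
      intro x hx P
      refine List.filter_eq_nil_iff.mpr ?_
      intro a ha
      obtain ⟨p, hp, rfl⟩ := List.mem_map.mp ha
      rw [pvJ_cons, String.toList_append, List.length_append]
      simpa using (by omega : ¬ (x.toList.length + (pvJ p).toList.length = m))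
    rw [← pvPerms_eq, ← pvPerms_eq]
    show ((((List.range (l1 ++ t :: l2).length).flatMap _).filter _).map _ = (((List.range (l1 ++ l2).length).flatMap _).filter _).map _)
    rw [pv_filter_flatMap, List.map_flatMap, pv_filter_flatMap, List.map_flatMap]
    have hL1 : (l1 ++ t :: l2).length = l1.length + (1 + l2.length) := by
      simp only [List.length_append, List.length_cons]
      omega
    have hL2 : (l1 ++ l2).length = l1.length + l2.length := by simp
    rw [hL1, hL2,
      List.range_add (n := l1.length) (m := 1 + l2.length),
      List.range_add (n := 1) (m := l2.length),
      List.range_add (n := l1.length) (m := l2.length),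
      List.range_one, List.map_append, List.map_map,
      List.flatMap_append, List.flatMap_append, List.flatMap_append,
      List.flatMap_map, List.flatMap_map]
    simp only [Function.comp_apply]
    rw [List.flatMap_map]
    have hB1 : ∀ i ∈ List.range l1.length,
        List.map pvJ ((((l1 ++ t :: l2)[i]?.map (fun x =>
            (pvPerms ((l1 ++ t :: l2).eraseIdx i) r).map (x :: ·))).getD []).filter
          (fun p => (pvJ p).toList.length == m))
        = List.map pvJ ((((l1 ++ l2)[i]?.map (fun x =>
            (pvPerms ((l1 ++ l2).eraseIdx i) r).map (x :: ·))).getD []).filter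
          (fun p => (pvJ p).toList.length == m)) := by
      intro i hi
      have hi' : i < l1.length := List.mem_range.mp hi
      have hx1 : (l1 ++ t :: l2)[i]? = some (l1[i]'hi') := by
        rw [List.getElem?_append_left hi', List.getElem?_eq_getElem hi']
      have hx2 : (l1 ++ l2)[i]? = some (l1[i]'hi') := by
        rw [List.getElem?_append_left hi', List.getElem?_eq_getElem hi']
      rw [hx1, hx2, Option.map_some, Option.getD_some, Option.map_some, Option.getD_some,
        List.eraseIdx_append_of_lt_length hi', List.eraseIdx_append_of_lt_length hi']
      have hlen1 : 1 ≤ (l1[i]'hi').toList.length :=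
        h1 _ (List.mem_append_left _ (List.getElem_mem hi'))
      by_cases hxm : (l1[i]'hi').toList.length ≤ m
      · rw [hcons _ hxm, hcons _ hxm]
        congr 1
        rw [pvPerms_eq, pvPerms_eq]
        exact ih (m - (l1[i]'hi').toList.length) (by omega) (l1.eraseIdx i) l2 (by
          intro l hl
          rcases List.mem_append.mp hl with h | h
          · exact h1 l (List.mem_append_left _ (List.mem_of_mem_eraseIdx h))
          · exact h1 l (List.mem_append_right _ h))
      · rw [hnil _ hxm, hnil _ hxm]
    have hB2 : List.map pvJ ((((l1 ++ t :: l2)[l1.length + 0]?.map (fun x =>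
            (pvPerms ((l1 ++ t :: l2).eraseIdx (l1.length + 0)) r).map (x :: ·))).getD []).filter
          (fun p => (pvJ p).toList.length == m)) = [] := by
      simp only [Nat.add_zero]
      have hx : (l1 ++ t :: l2)[l1.length]? = some t := by
        rw [List.getElem?_append_right (Nat.le_refl _), Nat.sub_self]
        rfl
      have he : (l1 ++ t :: l2).eraseIdx l1.length = l1 ++ l2 := by
        rw [List.eraseIdx_append_of_length_le (Nat.le_refl _), Nat.sub_self,
          List.eraseIdx_cons_zero]
      rw [hx, Option.map_some, Option.getD_some, he]
      have hfil : (List.map (t :: ·) (pvPerms (l1 ++ l2) r)).filter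
          (fun p => (pvJ p).toList.length == m) = [] := by
        refine List.filter_eq_nil_iff.mpr ?_
        intro a ha
        obtain ⟨p, hp, rfl⟩ := List.mem_map.mp ha
        rw [pvPerms_eq] at hp
        have hlenp : r ≤ (pvJ p).toList.length := pv_len_J_ge (l1 ++ l2) r p h1 hp
        rw [pvJ_cons, String.toList_append, List.length_append]
        simpa using (by omega : ¬ (t.toList.length + (pvJ p).toList.length = m))
      rw [hfil]
      rfl
    have hB3 : ∀ j ∈ List.range l2.length,
        List.map pvJ ((((l1 ++ t :: l2)[l1.length + (1 + j)]?.map (fun x =>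
            (pvPerms ((l1 ++ t :: l2).eraseIdx (l1.length + (1 + j))) r).map (x :: ·))).getD []).filter
          (fun p => (pvJ p).toList.length == m))
        = List.map pvJ ((((l1 ++ l2)[l1.length + j]?.map (fun x =>
            (pvPerms ((l1 ++ l2).eraseIdx (l1.length + j)) r).map (x :: ·))).getD []).filter
          (fun p => (pvJ p).toList.length == m)) := by
      intro j hj
      have hj' : j < l2.length := List.mem_range.mp hj
      have hx1 : (l1 ++ t :: l2)[l1.length + (1 + j)]? = some (l2[j]'hj') := by
        rw [List.getElem?_append_right (by omega)]
        have : l1.length + (1 + j) - l1.length = j + 1 := by omega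
        rw [this, List.getElem?_cons_succ, List.getElem?_eq_getElem hj']
      have hx2 : (l1 ++ l2)[l1.length + j]? = some (l2[j]'hj') := by
        rw [List.getElem?_append_right (by omega)]
        have : l1.length + j - l1.length = j := by omega
        rw [this, List.getElem?_eq_getElem hj']
      have he1 : (l1 ++ t :: l2).eraseIdx (l1.length + (1 + j)) = l1 ++ t :: l2.eraseIdx j := by
        rw [List.eraseIdx_append_of_length_le (by omega)]
        have : l1.length + (1 + j) - l1.length = j + 1 := by omega
        rw [this, List.eraseIdx_cons_succ]
      have he2 : (l1 ++ l2).eraseIdx (l1.length + j) = l1 ++ l2.eraseIdx j := by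
        rw [List.eraseIdx_append_of_length_le (by omega)]
        have : l1.length + j - l1.length = j := by omega
        rw [this]
      rw [hx1, hx2, Option.map_some, Option.getD_some, Option.map_some, Option.getD_some, he1, he2]
      have hlen1 : 1 ≤ (l2[j]'hj').toList.length :=
        h1 _ (List.mem_append_right _ (List.getElem_mem hj'))
      by_cases hxm : (l2[j]'hj').toList.length ≤ m
      · rw [hcons _ hxm, hcons _ hxm]
        congr 1
        rw [pvPerms_eq, pvPerms_eq]
        exact ih (m - (l2[j]'hj').toList.length) (by omega) l1 (l2.eraseIdx j) (by
          intro l hl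
          rcases List.mem_append.mp hl with h | h
          · exact h1 l (List.mem_append_left _ h)
          · exact h1 l (List.mem_append_right _ (List.mem_of_mem_eraseIdx h)))
      · rw [hnil _ hxm, hnil _ hxm]
    rw [pv_flatMap_congr _ _ _ hB1, pv_flatMap_congr _ _ _ hB3]
    simp only [List.flatMap_cons, List.flatMap_nil, List.append_nil]
    rw [hB2, List.nil_append]

theorem pv_comb_eq (letters : List String) (ng : String) :
    pvCombA letters ng = [ng] ++ letters.filter (fun l => !(PySem.Str.isIn l ng)) := by
  unfold pvCombA
  have hb : (fun (lc : List String) l => if PySem.Str.isIn l ng then lc else lc ++ [l])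
      = (fun (lc : List String) l => if (!(PySem.Str.isIn l ng)) = true then lc ++ [l] else lc) := by
    funext lc l
    cases h : PySem.Str.isIn l ng <;> simp [h]
  rw [hb, PySem.List.foldl_append_if_eq_filter]

theorem pv_permsA_eq (letters : List String) (w : Int) (ng : String)
    (hng : 2 ≤ ng.toList.length) (acc : List String) :
    pvPermsA letters w ng acc
      = acc ++ ((PySem.List.permutations (letters.filter (fun l => !(PySem.Str.isIn l ng)))
          w.toNat).filter (fun p => (p.map PySem.Str.len).sum == w)).map (PySem.Str.join "") := by
  unfold pvPermsA
  rw [PySem.List.foldl_append_if (fun p => PySem.Str.len (PySem.Str.join "" p) == w)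
    (fun p => PySem.Str.join "" p), pv_comb_eq]
  congr 1
  have hsum : ∀ p : List String, (p.map PySem.Str.len).sum = ((pvJ p).toList.length : Int) := by
    intro p
    rw [pvJ_toList, List.length_flatten, List.map_map]
    induction p with
    | nil => rfl
    | cons a q ihq =>
      simp only [List.map_cons, List.sum_cons, ihq, PySem.Str.len_eq, Function.comp_apply]
      push_cast
      ring
  rcases le_or_gt 0 w with hw | hw
  · have hpredA : ∀ p : List String,
        (PySem.Str.len (PySem.Str.join "" p) == w) = ((pvJ p).toList.length == w.toNat) := by
      intro p
      show (PySem.Str.len (pvJ p) == w) = _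
      rw [PySem.Str.len_eq]
      rcases eq_or_ne ((pvJ p).toList.length) w.toNat with h | h
      · have e1 : ((((pvJ p).toList.length : Int)) == w) = true := by
          simpa using (by omega : (((pvJ p).toList.length : Int)) = w)
        have e2 : (((pvJ p).toList.length) == w.toNat) = true := by simpa using h
        rw [e1, e2]
      · have e1 : ((((pvJ p).toList.length : Int)) == w) = false := by
          simpa using (by omega : ¬ ((((pvJ p).toList.length : Int)) = w))
        have e2 : (((pvJ p).toList.length) == w.toNat) = false := beq_eq_false_iff_ne.mpr h
        rw [e1, e2]
    have hpredB : ∀ p : List String,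
        ((p.map PySem.Str.len).sum == w) = ((pvJ p).toList.length == w.toNat) := by
      intro p
      rw [hsum]
      rcases eq_or_ne ((pvJ p).toList.length) w.toNat with h | h
      · have e1 : ((((pvJ p).toList.length : Int)) == w) = true := by
          simpa using (by omega : (((pvJ p).toList.length : Int)) = w)
        have e2 : (((pvJ p).toList.length) == w.toNat) = true := by simpa using h
        rw [e1, e2]
      · have e1 : ((((pvJ p).toList.length : Int)) == w) = false := by
          simpa using (by omega : ¬ ((((pvJ p).toList.length : Int)) = w))
        have e2 : (((pvJ p).toList.length) == w.toNat) = false := beq_eq_false_iff_ne.mpr h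
        rw [e1, e2]
    rw [List.filter_congr (fun p _ => hpredA p), List.filter_congr (fun p _ => hpredB p)]
    have := pv_main ng hng w.toNat w.toNat (Nat.le_refl _) []
      (letters.filter (fun l => !(PySem.Str.isIn l ng))) (by
        intro l hl
        exact pv_rest_len_ge letters ng l (by simpa using hl))
    simpa [pvJ] using this
  · have h0 : w.toNat = 0 := by omega
    rw [h0, PySem.List.permutations_zero, PySem.List.permutations_zero]
    have hj0 : PySem.Str.len (PySem.Str.join "" ([] : List String)) = 0 := by
      show PySem.Str.len (pvJ []) = 0
      rw [PySem.Str.len_eq, pvJ_toList]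
      rfl
    have e1 : (PySem.Str.len (PySem.Str.join "" ([] : List String)) == w) = false := by
      rw [hj0]
      exact beq_eq_false_iff_ne.mpr (by omega)
    have e2 : ((0 : Int) == w) = false := beq_eq_false_iff_ne.mpr (by omega)
    simp only [List.filter_cons, List.filter_nil, List.map_nil, List.sum_nil, e1, e2,
      Bool.false_eq_true, if_false]

theorem pv_upper_len (s : String) : (PySem.Str.upper s).toList.length = s.toList.length := by
  rw [PySem.Str.toList_upper]
  simp [PySem.Chars.upper]

-- ===== VERDICT (by name: the statement is the Claim_ definition above) =====
theorem guessWords_spec : Claim_equal_guessWords := by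
  intro lettersDict wordsLeft bigrams trigrams hdom hpre
  obtain ⟨hkeys, htri, hbi⟩ := hpre
  unfold Spec_guessWords guessWords guessWords_alt
  rw [pv_letters_eq]
  set letters := pvLettersB lettersDict with hlet
  have htf : trigrams.foldl (fun acc t =>
      if pvFoundA letters 3 t then acc ++ [PySem.Str.upper t] else acc) []
      = (trigrams.filter (fun t => pvFeasibleB letters t 3)).map PySem.Str.upper := by
    rw [PySem.List.foldl_congr_mem trigrams _
      (fun acc t => if pvFeasibleB letters t 3 then acc ++ [PySem.Str.upper t] else acc) []
      (by
        intro acc t htm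
        show (if pvFoundA letters 3 t = true then acc ++ [PySem.Str.upper t] else acc)
          = (if pvFeasibleB letters t 3 = true then acc ++ [PySem.Str.upper t] else acc)
        have h3 : (3 : Int) = ((3 : Nat) : Int) := by norm_num
        rcases htri t htm with hlen | hnf
        · rw [h3, pv_found_eq_feasible letters 3 t hlen]
        · have hnf' : pvFitsB letters t 3 = false := by
            rwa [pv_pool_eq, ← hlet] at hnf
          rw [h3, pv_found_false letters 3 t hnf', pv_feasibleB_eq letters t 3, hnf'])]
    exact PySem.List.foldl_append_if _ _ _ _
  have hbf : bigrams.foldl (fun acc b =>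
      if pvFoundA letters 2 b then acc ++ [PySem.Str.upper b] else acc) []
      = (bigrams.filter (fun b => pvFeasibleB letters b 2)).map PySem.Str.upper := by
    rw [PySem.List.foldl_congr_mem bigrams _
      (fun acc b => if pvFeasibleB letters b 2 then acc ++ [PySem.Str.upper b] else acc) []
      (by
        intro acc b hbm
        show (if pvFoundA letters 2 b = true then acc ++ [PySem.Str.upper b] else acc)
          = (if pvFeasibleB letters b 2 = true then acc ++ [PySem.Str.upper b] else acc)
        have h2 : (2 : Int) = ((2 : Nat) : Int) := by norm_num
        rcases hbi b hbm with hlen | hnf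
        · rw [h2, pv_found_eq_feasible letters 2 b hlen]
        · have hnf' : pvFitsB letters b 2 = false := by
            rwa [pv_pool_eq, ← hlet] at hnf
          rw [h2, pv_found_false letters 2 b hnf', pv_feasibleB_eq letters b 2, hnf'])]
    exact PySem.List.foldl_append_if _ _ _ _
  rw [htf, hbf]
  set tf := (trigrams.filter (fun t => pvFeasibleB letters t 3)).map PySem.Str.upper with htf'
  set bf := (bigrams.filter (fun b => pvFeasibleB letters b 2)).map PySem.Str.upper with hbf'
  have htflen : ∀ ng ∈ tf, 2 ≤ ng.toList.length := by
    intro ng hng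
    rw [htf'] at hng
    obtain ⟨t, htm, rfl⟩ := List.mem_map.mp hng
    have hfeas := List.of_mem_filter htm
    rcases htri t (List.mem_of_mem_filter htm) with hlen | hnf
    · rw [pv_upper_len]; omega
    · exfalso
      have hnf' : pvFitsB letters t 3 = false := by
        rwa [pv_pool_eq, ← hlet] at hnf
      rw [show (3 : Int) = ((3 : Nat) : Int) by norm_num, pv_feasibleB_eq letters t 3, hnf'] at hfeas
      exact Bool.false_ne_true hfeas
  have hbflen : ∀ ng ∈ bf, 2 ≤ ng.toList.length := by
    intro ng hng
    rw [hbf'] at hng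
    obtain ⟨b, hbm, rfl⟩ := List.mem_map.mp hng
    have hfeas := List.of_mem_filter hbm
    rcases hbi b (List.mem_of_mem_filter hbm) with hlen | hnf
    · rw [pv_upper_len]; omega
    · exfalso
      have hnf' : pvFitsB letters b 2 = false := by
        rwa [pv_pool_eq, ← hlet] at hnf
      rw [show (2 : Int) = ((2 : Nat) : Int) by norm_num, pv_feasibleB_eq letters b 2, hnf'] at hfeas
      exact Bool.false_ne_true hfeas
  have hstep : ∀ (res : List String × List String), ∀ w ∈ wordsLeft,
      (tf.foldl (fun acc tg => pvPermsA letters w tg acc) res.1,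
       bf.foldl (fun acc bg => pvPermsA letters w bg acc) res.2)
      = (res.1 ++ tf.flatMap (fun ng =>
           ((PySem.List.permutations (letters.filter (fun l => !(PySem.Str.isIn l ng)))
             w.toNat).filter (fun p => (p.map PySem.Str.len).sum == w)).map (PySem.Str.join "")),
         res.2 ++ bf.flatMap (fun ng =>
           ((PySem.List.permutations (letters.filter (fun l => !(PySem.Str.isIn l ng)))
             w.toNat).filter (fun p => (p.map PySem.Str.len).sum == w)).map (PySem.Str.join ""))) := by
    intro res w _
    have hg : ∀ (found : List String), (∀ ng ∈ found, 2 ≤ ng.toList.length) → ∀ init : List String,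
        found.foldl (fun acc ng => pvPermsA letters w ng acc) init
        = init ++ found.flatMap (fun ng =>
            ((PySem.List.permutations (letters.filter (fun l => !(PySem.Str.isIn l ng)))
              w.toNat).filter (fun p => (p.map PySem.Str.len).sum == w)).map (PySem.Str.join "")) := by
      intro found hlen init
      rw [PySem.List.foldl_congr_mem found _
        (fun acc ng => acc ++ ((PySem.List.permutations
            (letters.filter (fun l => !(PySem.Str.isIn l ng))) w.toNat).filter
              (fun p => (p.map PySem.Str.len).sum == w)).map (PySem.Str.join ""))
        init
        (fun acc ng hng => pv_permsA_eq letters w ng (hlen ng hng) acc)]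
      exact PySem.List.foldl_append_eq_flatMap _ _ _
    rw [hg tf htflen res.1, hg bf hbflen res.2]
  rw [PySem.List.foldl_congr_mem wordsLeft _
    (fun (res : List String × List String) w =>
      (res.1 ++ tf.flatMap (fun ng =>
          ((PySem.List.permutations (letters.filter (fun l => !(PySem.Str.isIn l ng)))
            w.toNat).filter (fun p => (p.map PySem.Str.len).sum == w)).map (PySem.Str.join "")),
       res.2 ++ bf.flatMap (fun ng =>
          ((PySem.List.permutations (letters.filter (fun l => !(PySem.Str.isIn l ng)))
            w.toNat).filter (fun p => (p.map PySem.Str.len).sum == w)).map (PySem.Str.join "")))) ([], [])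
    (fun res w hw => hstep res w hw)]
  have hsplit : wordsLeft.foldl (fun (res : List String × List String) w =>
      (res.1 ++ tf.flatMap (fun ng =>
          ((PySem.List.permutations (letters.filter (fun l => !(PySem.Str.isIn l ng)))
            w.toNat).filter (fun p => (p.map PySem.Str.len).sum == w)).map (PySem.Str.join "")),
       res.2 ++ bf.flatMap (fun ng =>
          ((PySem.List.permutations (letters.filter (fun l => !(PySem.Str.isIn l ng)))
            w.toNat).filter (fun p => (p.map PySem.Str.len).sum == w)).map (PySem.Str.join "")))) ([], [])
      = (wordsLeft.foldl (fun (a : List String) w => a ++ tf.flatMap (fun ng =>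
          ((PySem.List.permutations (letters.filter (fun l => !(PySem.Str.isIn l ng)))
            w.toNat).filter (fun p => (p.map PySem.Str.len).sum == w)).map (PySem.Str.join ""))) [],
         wordsLeft.foldl (fun (a : List String) w => a ++ bf.flatMap (fun ng =>
          ((PySem.List.permutations (letters.filter (fun l => !(PySem.Str.isIn l ng)))
            w.toNat).filter (fun p => (p.map PySem.Str.len).sum == w)).map (PySem.Str.join ""))) []) :=
    PySem.List.foldl_prod_mk
      (fun (a : List String) w => a ++ tf.flatMap (fun ng =>
          ((PySem.List.permutations (letters.filter (fun l => !(PySem.Str.isIn l ng)))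
            w.toNat).filter (fun p => (p.map PySem.Str.len).sum == w)).map (PySem.Str.join "")))
      (fun (a : List String) w => a ++ bf.flatMap (fun ng =>
          ((PySem.List.permutations (letters.filter (fun l => !(PySem.Str.isIn l ng)))
            w.toNat).filter (fun p => (p.map PySem.Str.len).sum == w)).map (PySem.Str.join ""))) wordsLeft [] []
  rw [hsplit]
  unfold pvGenB
  rw [PySem.List.foldl_append_eq_flatMap, PySem.List.foldl_append_eq_flatMap]
  simp
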